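-- pv_equiv track=rewrite | github.com/gordanny/Algorithms | p_func.py | p_func
-- ===== SOURCE A (Python) =====
-- def p_func(S):
--     n = len(S)
--     P = [0] * n
--     for i in range(1, n):
--         P[i] = P[i - 1]
--         while P[i] > 0 and S[i] != S[P[i]]:
--             P[i] -= 1
--         if S[i] == S[P[i]]:
--             P[i] += 1
--     return P
-- ===== SOURCE B (Python) =====
-- def _bisect_right(a, x, lo, hi):
--     # index of the first element of a[lo:hi] greater than x (a sorted ascending)
--     if lo >= hi:
--         return lo
--     mid = (lo + hi) // 2
--     if a[mid] <= x:
--         return _bisect_right(a, x, mid + 1, hi)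
--     else:
--         return _bisect_right(a, x, lo, mid)
--
--
-- def p_func(S):
--     # P[i] = 1 + (largest j <= P[i-1] with S[j] == S[i]), or 0 if no such j.
--     # Keep, per character, the sorted list of its positions seen so far and
--     # binary-search it instead of decrementing one step at a time.
--     n = len(S)
--     P = [0] * n
--     occ = {}
--     if n:
--         occ[S[0]] = [0]
--     for i in range(1, n):
--         lst = occ.get(S[i])
--         if lst:
--             k = _bisect_right(lst, P[i - 1], 0, len(lst))
--             P[i] = lst[k - 1] + 1 if k else 0
--         else:
--             P[i] = 0
--         occ.setdefault(S[i], []).append(i)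
--     return P
-- ===== Notes on version B (the rewrite author's own statement) =====
-- stated objective: alternative
-- what changed: B replaces A's one-step-at-a-time decrement of P[i] with a different mechanism: it keeps, per character, the sorted list of positions seen so far and binary-searches it for the largest position <= P[i-1] holding a matching character (not faster in the measured cases: A's inner loop rarely runs on typical text).
import Mathlib
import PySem

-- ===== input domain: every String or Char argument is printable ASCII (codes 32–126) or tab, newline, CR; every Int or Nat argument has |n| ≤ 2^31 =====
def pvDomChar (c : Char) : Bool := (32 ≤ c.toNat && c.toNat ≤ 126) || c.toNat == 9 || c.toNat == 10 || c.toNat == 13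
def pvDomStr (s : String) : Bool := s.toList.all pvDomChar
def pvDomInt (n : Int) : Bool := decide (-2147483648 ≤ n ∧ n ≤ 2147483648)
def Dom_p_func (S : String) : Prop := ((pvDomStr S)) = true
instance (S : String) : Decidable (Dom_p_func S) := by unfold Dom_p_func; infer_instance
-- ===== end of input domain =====

-- B replaces A's step-by-step decrement of P[i] by a binary search in per-character
-- sorted occurrence-index lists (objective: alternative algorithm, same measured cost).

-- ===== PORT A =====

-- the while loop: while P[i] > 0 and S[i] != S[P[i]]: P[i] -= 1
def pfDec (s : List Char) (c : Char) : Nat → Nat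
  | 0 => 0
  | p + 1 => if c ≠ s.getD (p + 1) ' ' then pfDec s c p else p + 1

-- the for loop over i = 1 .. n-1; prev = P[i-1], fuel = number of remaining iterations
def pfALoop (s : List Char) (prev i : Nat) : Nat → List Nat
  | 0 => []
  | f + 1 =>
    let c := s.getD i ' '
    let q := pfDec s c prev
    let v := if c = s.getD q ' ' then q + 1 else q
    v :: pfALoop s v (i + 1) f

def p_func (S : String) : List Int :=
  let s := S.toList
  let n := s.length
  if n = 0 then [] else (0 :: pfALoop s 0 1 (n - 1)).map (fun k => (k : Int))

-- ===== PORT B =====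

-- hand-written bisect_right from Source B
def pfBis (a : List Nat) (x : Nat) (lo hi : Nat) : Nat :=
  if h : lo ≥ hi then lo
  else
    let mid := (lo + hi) / 2
    if a.getD mid 0 ≤ x then pfBis a x (mid + 1) hi else pfBis a x lo mid
termination_by hi - lo
decreasing_by all_goals omega

def pfBLoop (s : List Char) (occ : PySem.Dict Char (List Nat)) (prev i : Nat) : Nat → List Nat
  | 0 => []
  | f + 1 =>
    let c := s.getD i ' '
    let v := match occ.get? c with
      | none => 0
      | some lst =>
        if lst.isEmpty then 0
        else
          let k := pfBis lst prev 0 lst.length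
          if k = 0 then 0 else lst.getD (k - 1) 0 + 1
    let occ' := occ.insert c (occ.getD c [] ++ [i])
    v :: pfBLoop s occ' v (i + 1) f

def p_func_alt (S : String) : List Int :=
  let s := S.toList
  let n := s.length
  if n = 0 then []
  else
    let occ : PySem.Dict Char (List Nat) := PySem.Dict.empty.insert (s.getD 0 ' ') [0]
    (0 :: pfBLoop s occ 0 1 (n - 1)).map (fun k => (k : Int))

-- ===== PRECONDITION & SPEC =====
def Spec_p_func (S : String) (out : List Int) : Prop := out = p_func_alt S
instance (S : String) (out : List Int) : Decidable (Spec_p_func S out) := by unfold Spec_p_func; infer_instance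

-- ===== CLAIM (what is proved, stated in full; the proofs are below) =====
def Claim_equal_p_func : Prop := ∀ (S : String), Dom_p_func S → Spec_p_func S (p_func S)

-- ===== LEMMAS AND PROOFS =====

-- common value of one loop step: 1 + largest j ≤ p with s[j] = c, else 0
def pfMid (s : List Char) (c : Char) (p : Nat) : Nat :=
  match ((List.range (p + 1)).filter (fun j => s.getD j ' ' = c)).getLast? with
  | some j => j + 1
  | none => 0

theorem pfA_step_eq_mid (s : List Char) (c : Char) (p : Nat) :
    (if c = s.getD (pfDec s c p) ' ' then pfDec s c p + 1 else pfDec s c p) = pfMid s c p := by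
  induction p with
  | zero =>
    by_cases h : s.getD 0 ' ' = c <;>
      simp_all [pfDec, pfMid, List.getD, eq_comm]
  | succ p ih =>
    by_cases h : s.getD (p + 1) ' ' = c
    · have hdec : pfDec s c (p + 1) = p + 1 := by
        simp [pfDec, h.symm]
      rw [hdec, if_pos h.symm]
      unfold pfMid
      rw [List.range_succ, List.filter_append]
      simp [List.getD] at h
      simp [h, List.getD]
    · have h2 : ¬ c = s.getD (p + 1) ' ' := fun e => h e.symm
      have h3 : ¬ c = s[p+1]?.getD ' ' := by simpa [List.getD] using h2
      have hdec : pfDec s c (p + 1) = pfDec s c p := by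
        simp [pfDec, h3]
      have hmid : pfMid s c (p + 1) = pfMid s c p := by
        unfold pfMid
        rw [List.range_succ, List.filter_append]
        simp [List.getD] at h
        simp [h, List.getD]
      rw [hdec, hmid, ← ih]


theorem pfBis_spec (a : List Nat) (x : Nat) (hs : a.Pairwise (· ≤ ·)) :
    ∀ lo hi, lo ≤ hi → hi ≤ a.length →
      (∀ j, j < lo → j < a.length → a.getD j 0 ≤ x) →
      (∀ j, hi ≤ j → j < a.length → x < a.getD j 0) →
      (pfBis a x lo hi ≤ a.length ∧
        (∀ j, j < pfBis a x lo hi → j < a.length → a.getD j 0 ≤ x) ∧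
        (∀ j, pfBis a x lo hi ≤ j → j < a.length → x < a.getD j 0)) := by
  have hmono : ∀ i j, i ≤ j → j < a.length → a.getD i 0 ≤ a.getD j 0 := by
    intro i j hij hj
    rcases Nat.lt_or_eq_of_le hij with hlt | rfl
    · have hi' : i < a.length := lt_trans hlt hj
      rw [List.getD_eq_getElem a 0 hi', List.getD_eq_getElem a 0 hj]
      exact List.pairwise_iff_getElem.mp hs i j hi' hj hlt
    · rfl
  intro lo hi
  fun_induction pfBis a x lo hi with
  | case1 lo hi h =>
    intro h1 h2 hlo hhi
    have : lo = hi := by omega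
    subst this
    exact ⟨h2, fun j hj hj2 => hlo j hj hj2, fun j hj hj2 => hhi j hj hj2⟩
  | case2 lo hi h mid hle ih =>
    intro h1 h2 hlo hhi
    have hlt : lo < hi := lt_of_not_ge h
    have hm : mid < hi := by omega
    apply ih
    · omega
    · exact h2
    · intro j hj hj2
      exact le_trans (hmono j mid (by omega) (by omega)) hle
    · exact hhi
  | case3 lo hi h mid hgt ih =>
    intro h1 h2 hlo hhi
    have hlt : lo < hi := lt_of_not_ge h
    have hm : mid < hi := by omega
    apply ih
    · omega
    · omega
    · exact hlo
    · intro j hj hj2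
      exact lt_of_lt_of_le (lt_of_not_ge hgt) (hmono mid j hj hj2)

theorem pfB_step_eq_mid (s : List Char) (occ : PySem.Dict Char (List Nat)) (prev i : Nat)
    (hocc : ∀ c, occ.getD c [] = (List.range i).filter (fun j => s.getD j ' ' = c))
    (hprev : prev < i) (c : Char) :
    (match occ.get? c with
      | none => 0
      | some lst =>
        if lst.isEmpty then 0
        else
          let k := pfBis lst prev 0 lst.length
          if k = 0 then 0 else lst.getD (k - 1) 0 + 1) = pfMid s c prev := by
  obtain ⟨d, rfl⟩ : ∃ d, i = prev + 1 + d := ⟨i - (prev + 1), by omega⟩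
  have hsplit : (List.range (prev + 1 + d)).filter (fun j => decide (s.getD j ' ' = c)) =
      (List.range (prev + 1)).filter (fun j => decide (s.getD j ' ' = c)) ++
      ((List.range d).map ((prev + 1) + ·)).filter (fun j => decide (s.getD j ' ' = c)) := by
    rw [← List.filter_append, ← List.range_add]
  set L := (List.range (prev + 1)).filter (fun j => decide (s.getD j ' ' = c)) with hL
  set T := ((List.range d).map ((prev + 1) + ·)).filter (fun j => decide (s.getD j ' ' = c)) with hT
  have hLle : ∀ e ∈ L, e ≤ prev := by
    intro e he
    have := (List.mem_filter.mp he).1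
    have := List.mem_range.mp this
    omega
  have hTgt : ∀ e ∈ T, prev < e := by
    intro e he
    have := (List.mem_filter.mp he).1
    rcases List.mem_map.mp this with ⟨w, _, rfl⟩
    omega
  have hmid : pfMid s c prev = match L.getLast? with | some j => j + 1 | none => 0 := rfl
  cases hget : occ.get? c with
  | none =>
    have h0 : occ.getD c [] = [] := by
      rw [PySem.Dict.getD_eq_get?_getD, hget]; rfl
    have hnil : L = [] := by
      have h1 := (hocc c).symm.trans h0
      rw [hsplit] at h1
      exact (List.append_eq_nil_iff.mp h1).1
    simp [hmid, hnil]
  | some lst =>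
    have hlst : lst = (List.range (prev + 1 + d)).filter (fun j => decide (s.getD j ' ' = c)) := by
      have h1 := hocc c
      rwa [PySem.Dict.getD_eq_get?_getD, hget] at h1
    have hcat : lst = L ++ T := by rw [hlst, hsplit]
    have hlen0 : lst.length = L.length + T.length := by rw [hcat]; simp
    change (if lst.isEmpty = true then 0
      else
        let k := pfBis lst prev 0 lst.length
        if k = 0 then 0 else lst.getD (k - 1) 0 + 1) = pfMid s c prev
    by_cases hemp : lst.isEmpty
    · have hnil : L = [] := by
        rw [List.isEmpty_iff] at hemp
        rw [hemp] at hcat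
        exact (List.append_eq_nil_iff.mp hcat.symm).1
      simp [hemp, hmid, hnil]
    · rw [if_neg hemp]
      have hpw : lst.Pairwise (· ≤ ·) := by
        rw [hlst]
        exact (List.pairwise_lt_range.filter _).imp le_of_lt
      obtain ⟨hrle, hlo, hhi⟩ := pfBis_spec lst prev hpw 0 lst.length (Nat.zero_le _) (le_refl _)
        (by omega) (by intro j hj hj2; omega)
      set r := pfBis lst prev 0 lst.length with hr
      have hrL : r = L.length := by
        by_contra hne
        rcases Nat.lt_or_ge r L.length with hlt | hge
        · have hrlen : r < lst.length := by omega
          have hmem : lst.getD r 0 ∈ L := by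
            rw [hcat, List.getD_eq_getElem?_getD, List.getElem?_append_left hlt,
              List.getElem?_eq_getElem hlt]
            exact List.getElem_mem hlt
          have h1 := hLle _ hmem
          have h2 := hhi r (le_refl r) hrlen
          omega
        · have hgt : L.length < r := by omega
          have hlen : L.length < lst.length := lt_of_lt_of_le hgt hrle
          have hTne : 0 < T.length := by omega
          have hmem : lst.getD L.length 0 ∈ T := by
            rw [hcat, List.getD_eq_getElem?_getD, List.getElem?_append_right (le_refl _),
              Nat.sub_self, List.getElem?_eq_getElem hTne]
            exact List.getElem_mem hTne
          have h1 := hTgt _ hmem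
          have h2 := hlo L.length hgt hlen
          omega
      by_cases hz : r = 0
      · have hnil : L = [] := List.eq_nil_of_length_eq_zero (by omega)
        simp [hz, hmid, hnil]
      · have hidx : r - 1 < L.length := by omega
        have hval : lst.getD (r - 1) 0 = L[r - 1]'(hidx) := by
          rw [hcat, List.getD_eq_getElem?_getD, List.getElem?_append_left hidx,
            List.getElem?_eq_getElem hidx]
          rfl
        have hlast : L.getLast? = some (L[r - 1]'(hidx)) := by
          rw [List.getLast?_eq_getElem?]
          have he : L.length - 1 = r - 1 := by omega
          rw [he, List.getElem?_eq_getElem hidx]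
        rw [hmid, hlast]
        simp only [if_neg hz]
        rw [hval]


theorem pfMid_le (s : List Char) (c : Char) (p : Nat) : pfMid s c p ≤ p + 1 := by
  unfold pfMid
  cases hl : ((List.range (p + 1)).filter (fun j => s.getD j ' ' = c)).getLast? with
  | none => simp
  | some j =>
    have hmem : j ∈ (List.range (p + 1)).filter (fun j => decide (s.getD j ' ' = c)) :=
      List.mem_of_getLast? hl
    have := List.mem_range.mp (List.mem_filter.mp hmem).1
    simp
    omega

theorem pfLoop_eq (s : List Char) : ∀ (f i prev : Nat) (occ : PySem.Dict Char (List Nat)),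
    prev < i →
    (∀ c, occ.getD c [] = (List.range i).filter (fun j => s.getD j ' ' = c)) →
    pfALoop s prev i f = pfBLoop s occ prev i f := by
  intro f
  induction f with
  | zero => intro i prev occ _ _; rfl
  | succ f ih =>
    intro i prev occ hprev hocc
    show (let c := s.getD i ' '
          let q := pfDec s c prev
          let v := if c = s.getD q ' ' then q + 1 else q
          v :: pfALoop s v (i + 1) f) =
         (let c := s.getD i ' '
          let v := match occ.get? c with
            | none => 0
            | some lst =>
              if lst.isEmpty then 0
              else
                let k := pfBis lst prev 0 lst.length
                if k = 0 then 0 else lst.getD (k - 1) 0 + 1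
          let occ' := occ.insert c (occ.getD c [] ++ [i])
          v :: pfBLoop s occ' v (i + 1) f)
    simp only
    rw [pfA_step_eq_mid, pfB_step_eq_mid s occ prev i hocc hprev]
    congr 1
    apply ih
    · have := pfMid_le s (s.getD i ' ') prev
      omega
    · intro c'
      rw [PySem.Dict.getD_insert]
      by_cases hc : c' = s.getD i ' '
      · rw [if_pos hc, hocc, List.range_succ, List.filter_append]
        subst hc
        simp
      · rw [if_neg hc, hocc, List.range_succ, List.filter_append]
        have h2 : ¬ s[i]?.getD ' ' = c' := by
          simpa [List.getD] using (fun e => hc e.symm : ¬ s.getD i ' ' = c')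
        simp [h2]

-- ===== VERDICT (by name: the statement is the Claim_ definition above) =====
theorem p_func_spec : Claim_equal_p_func := by
  intro S _
  unfold Spec_p_func p_func p_func_alt
  by_cases h : S.toList.length = 0
  · simp [h]
  · have hinv : ∀ c', (PySem.Dict.empty.insert (S.toList.getD 0 ' ') [0]).getD c' [] =
        (List.range 1).filter (fun j => S.toList.getD j ' ' = c') := by
      intro c'
      rw [PySem.Dict.getD_insert]
      by_cases hc : c' = S.toList.getD 0 ' '
      · rw [if_pos hc]
        subst hc
        simp [List.range_one]
      · rw [if_neg hc, PySem.Dict.getD_empty]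
        have h2 : ¬ S.toList[0]?.getD ' ' = c' := by
          simpa [List.getD] using (fun e => hc e.symm : ¬ S.toList.getD 0 ' ' = c')
        simp [List.range_one, h2]
    simp only [h, reduceIte]
    rw [pfLoop_eq S.toList (S.toList.length - 1) 1 0 _ (by omega) hinv]
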